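-- pv_equiv track=rewrite | github.com/teichholz/aoc | aoc-py/2024/day17.py | search
-- ===== SOURCE A (Python) =====
-- def search(out=[2, 4, 1, 1, 7, 5, 1, 5, 4, 0, 5, 5, 0, 3, 3, 0], A=0):
--     """
--     Search in reverse:
--     - start state is: out = [2,4,1,1,7,5,1,5,4,0,5,5,0,3,3,0], A=0
--     - end state ist: out = [], min(8 ** 15 <= A < 8 ** 16)
--     """
--     if out == []:
--         return A
--
--     # A+t=A//8, A = A+T*8+[0, 7]
--     A *= 8
--     for a in range(8):
--         A_ = A + a
--
--         B = A_ & 7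
--         B_1 = B ^ 1
--         C = A_ // 2**B_1
--         B_2 = B_1 ^ 5
--         B_3 = B_2 ^ C
--
--         if B_3 & 7 == out[-1]:
--             found = search(out[:-1], A_)
--             # there might be solutions which later turn out to be wrong, so we check that here
--             if found != -1:
--                 return found
--
--     return -1
-- ===== SOURCE B (Python) =====
-- def search(out=[2, 4, 1, 1, 7, 5, 1, 5, 4, 0, 5, 5, 0, 3, 3, 0], A=0):
--     """Iterative DFS with an explicit LIFO stack instead of recursion.
--
--     Children are pushed for a = 7 down to 0, so the stack pops them in
--     ascending order, reproducing the recursive first-found order.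
--     """
--     stack = [(out, A)]
--     while stack:
--         rem, acc = stack.pop()
--         if not rem:
--             return acc
--         base = acc * 8
--         tail = rem[-1]
--         for a in range(7, -1, -1):
--             A_ = base + a
--             B_1 = (A_ & 7) ^ 1
--             B_3 = (B_1 ^ 5) ^ (A_ >> B_1)
--             if B_3 & 7 == tail:
--                 stack.append((rem[:-1], A_))
--     return -1
-- ===== Notes on version B (the rewrite author's own statement) =====
-- stated objective: alternative
-- what changed: Replaces A's recursive DFS (with an inner for-loop and early return) by an iterative worklist search over an explicit LIFO stack of (remaining_out, A) states, pushing candidate digits 7..0 so pops reproduce A's first-found order; the quotient A_//2**B_1 becomes the shift A_>>B_1.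
import Mathlib
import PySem

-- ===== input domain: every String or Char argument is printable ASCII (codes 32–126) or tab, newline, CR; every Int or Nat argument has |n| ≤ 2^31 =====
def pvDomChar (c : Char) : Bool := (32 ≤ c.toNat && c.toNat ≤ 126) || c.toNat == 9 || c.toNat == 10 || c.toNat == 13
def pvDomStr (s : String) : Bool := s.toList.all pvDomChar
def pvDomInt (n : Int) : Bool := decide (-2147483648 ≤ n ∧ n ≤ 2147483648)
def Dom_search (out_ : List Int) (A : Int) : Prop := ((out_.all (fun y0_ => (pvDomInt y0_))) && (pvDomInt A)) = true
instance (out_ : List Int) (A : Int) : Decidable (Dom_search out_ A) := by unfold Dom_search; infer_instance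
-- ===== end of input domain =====

-- B rewrites A's recursive DFS as an iterative search over an explicit LIFO stack of
-- (remaining_out, A) states (objective: alternative decomposition, same first-found order).

-- termination facts the ports cite by name in their decreasing_by (kept as named theorems
-- so the recursive definitions carry only small proof terms)
theorem pv_dec_outer (L : Nat) (a : Nat) (_ : a < 8) : L * 10 + (8 - 0) < L * 10 + 9 :=
  Nat.add_lt_add_left (by omega) _
theorem pv_dec_call {α : Type} (out_ : List α) (x : α) (a : Nat)
    (hc : PySem.List.pyGet? out_ (-1) = some x) (_ : a < 8) :
    (PySem.List.slice out_ none (some (-1))).length * 10 + 9 < out_.length * 10 + (8 - a) := by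
  have hne : out_ ≠ [] := by rintro rfl; simp [PySem.List.pyGet?_neg_one] at hc
  have h1 : (PySem.List.slice out_ none (some (-1))).length = out_.length - 1 := by
    rw [PySem.List.slice_to_neg_one, List.length_dropLast]
  have h2 : 0 < out_.length := List.length_pos_iff.mpr hne
  omega
theorem pv_dec_next (L : Nat) (a : Nat) (h : a < 8) :
    L * 10 + (8 - (a + 1)) < L * 10 + (8 - a) :=
  Nat.add_lt_add_left (by omega) _

-- ===== PORT A =====
-- A: recursive DFS; for each nonempty out, try digits a = 0..7 in order, recurse on out[:-1].
mutual
def search (out_ : List Int) (A : Int) : Int :=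
  if out_ = [] then A
  else searchLoop out_ (A * 8) 0
  termination_by out_.length * 10 + 9
  decreasing_by exact pv_dec_outer out_.length 0 (by decide)

-- the body of A's 'for a in range(8)' loop with early return; a counts 0,1,…,7
def searchLoop (out_ : List Int) (A : Int) (a : Nat) : Int :=
  if _h8 : a < 8 then
    let A_ : Int := A + (a : Int)
    let B := PySem.Int.band A_ 7
    let B_1 := PySem.Int.bxor B 1
    -- 2**B_1: B_1 = (A_ & 7) ^ 1 ∈ [0,7], so the Nat exponent B_1.toNat is exact
    let C := PySem.Int.floordiv A_ ((2 : Int) ^ B_1.toNat)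
    let B_2 := PySem.Int.bxor B_1 5
    let B_3 := PySem.Int.bxor B_2 C
    if hc : PySem.List.pyGet? out_ (-1) = some (PySem.Int.band B_3 7) then
      let found := search (PySem.List.slice out_ none (some (-1))) A_
      if found ≠ -1 then found else searchLoop out_ A (a + 1)
    else searchLoop out_ A (a + 1)
  else -1
  termination_by out_.length * 10 + (8 - a)
  decreasing_by
    · exact pv_dec_call out_ _ a hc _h8
    · exact pv_dec_next out_.length a _h8
    · exact pv_dec_next out_.length a _h8
end

-- ===== PORT B =====
-- B-side helper: the block the Python for-loop (a = 7 down to 0) appends to the stack.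
def searchChildren (rem : List Int) (base tail : Int) : List (List Int × Int) :=
  (PySem.List.pyRange 7 (-1) (-1)).foldl (fun st a =>
    let A_ := base + a
    let B_1 := PySem.Int.bxor (PySem.Int.band A_ 7) 1
    let B_3 := PySem.Int.bxor (PySem.Int.bxor B_1 5) (A_ >>> B_1.toNat)
    if PySem.Int.band B_3 7 = tail then st ++ [(PySem.List.slice rem none (some (-1)), A_)]
    else st) []

-- facts the termination argument of goStack cites (proved here because the port needs them)
theorem searchChildren_eq (rem : List Int) (base tail : Int) :
    searchChildren rem base tail =
      (((PySem.List.pyRange 7 (-1) (-1)).filter (fun a =>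
          decide (PySem.Int.band (PySem.Int.bxor (PySem.Int.bxor (PySem.Int.bxor (PySem.Int.band (base + a) 7) 1) 5)
            ((base + a) >>> (PySem.Int.bxor (PySem.Int.band (base + a) 7) 1).toNat)) 7 = tail))).map
        (fun a => (rem.dropLast, base + a))) := by
  unfold searchChildren
  rw [show (fun (st : List (List Int × Int)) (a : Int) =>
      let A_ := base + a
      let B_1 := PySem.Int.bxor (PySem.Int.band A_ 7) 1
      let B_3 := PySem.Int.bxor (PySem.Int.bxor B_1 5) (A_ >>> B_1.toNat)
      if PySem.Int.band B_3 7 = tail then st ++ [(PySem.List.slice rem none (some (-1)), A_)]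
      else st) = (fun st a =>
        if (fun a => decide (PySem.Int.band (PySem.Int.bxor (PySem.Int.bxor (PySem.Int.bxor (PySem.Int.band (base + a) 7) 1) 5)
            ((base + a) >>> (PySem.Int.bxor (PySem.Int.band (base + a) 7) 1).toNat)) 7 = tail)) a = true
        then st ++ [(fun a => (rem.dropLast, base + a)) a] else st) from by
    funext st a; simp [PySem.List.slice_to_neg_one]]
  exact PySem.List.foldl_append_if _ _ _ _

theorem searchChildren_measure (rem : List Int) (base tail : Int) (h : rem ≠ []) :
    ((searchChildren rem base tail).map (fun p => 9 ^ p.1.length)).sum < 9 ^ rem.length := by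
  rw [searchChildren_eq]
  set l := ((PySem.List.pyRange 7 (-1) (-1)).filter _) with hl
  have hlen : l.length ≤ 8 := by
    have := List.length_filter_le (l := PySem.List.pyRange 7 (-1) (-1))
      (p := fun a => decide (PySem.Int.band (PySem.Int.bxor (PySem.Int.bxor (PySem.Int.bxor (PySem.Int.band (base + a) 7) 1) 5)
            ((base + a) >>> (PySem.Int.bxor (PySem.Int.band (base + a) 7) 1).toNat)) 7 = tail))
    simpa [hl, PySem.List.pyRange_neg_one_eq_reverse] using this
  rw [List.map_map]
  have hmap : (List.map ((fun p : List Int × Int => 9 ^ p.1.length) ∘ fun a => (rem.dropLast, base + a)) l).sum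
      = l.length * 9 ^ rem.dropLast.length := by
    rw [show ((fun p : List Int × Int => 9 ^ p.1.length) ∘ fun a : Int => (rem.dropLast, base + a))
        = fun _ => 9 ^ rem.dropLast.length from funext (fun _ => rfl)]
    induction l with
    | nil => simp
    | cons x xs ih => simp; ring
  rw [hmap, List.length_dropLast]
  have h2 : 0 < rem.length := List.length_pos_iff.mpr h
  calc l.length * 9 ^ (rem.length - 1) ≤ 8 * 9 ^ (rem.length - 1) := by
        exact Nat.mul_le_mul_right _ hlen
    _ < 9 * 9 ^ (rem.length - 1) := by
        have : 0 < 9 ^ (rem.length - 1) := by positivity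
        omega
    _ = 9 ^ rem.length := by
        rw [← pow_succ']
        congr 1; omega

theorem pv_dec_stack (rem : List Int) (acc : Int) (st : List (List Int × Int)) (h : ¬ rem = []) :
    (((searchChildren rem (acc * 8) (PySem.List.pyGetD rem (-1) 0)).reverse ++ st).map
        (fun p => 9 ^ p.1.length)).sum
      < (((rem, acc) :: st).map (fun p => 9 ^ p.1.length)).sum := by
  simp only [List.map_append, List.sum_append, List.map_cons, List.sum_cons, List.map_reverse,
    List.sum_reverse]
  have := searchChildren_measure rem (acc * 8) (PySem.List.pyGetD rem (-1) 0) h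
  omega

def goStack : List (List Int × Int) → Int
  | [] => -1
  | (rem, acc) :: st =>
    if h : rem = [] then acc
    else
      -- Python's stack grows at its end; here the top of the stack is the list head, so the
      -- block pushed by the for-loop lands reversed in front.
      goStack ((searchChildren rem (acc * 8) (PySem.List.pyGetD rem (-1) 0)).reverse ++ st)
termination_by st => ((st.map (fun p => 9 ^ p.1.length)).sum)
decreasing_by
  exact pv_dec_stack rem acc st h

def search_alt (out_ : List Int) (A : Int) : Int := goStack [(out_, A)]

-- ===== PRECONDITION & SPEC =====
def Spec_search (out_ : List Int) (A : Int) (out : Int) : Prop := out = search_alt out_ A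
instance (out_ : List Int) (A : Int) (out : Int) : Decidable (Spec_search out_ A out) := by unfold Spec_search; infer_instance

-- ===== CLAIM (what is proved, stated in full; the proofs are below) =====
def Claim_equal_search : Prop := ∀ (out_ : List Int) (A : Int), Dom_search out_ A → Spec_search out_ A (search out_ A)

-- ===== LEMMAS AND PROOFS =====

-- digit produced by a candidate A_ (shift form, as B computes it)
def pvDigit (x : Int) : Int :=
  PySem.Int.band (PySem.Int.bxor (PySem.Int.bxor (PySem.Int.bxor (PySem.Int.band x 7) 1) 5)
    (x >>> (PySem.Int.bxor (PySem.Int.band x 7) 1).toNat)) 7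

theorem pv_floordiv_pow (a : Int) (k : Nat) : PySem.Int.floordiv a ((2:Int) ^ k) = a >>> k := by
  rw [PySem.Int.floordiv_eq_ediv_of_pos (by positivity), Int.shiftRight_eq_div_pow]
  norm_cast

-- the pushed block, reversed (= popping order): ascending filtered digits 0..7
theorem children_rev (rem : List Int) (base tail : Int) :
    (searchChildren rem base tail).reverse =
      ((PySem.List.pyRange 0 8 1).filter (fun a => decide (pvDigit (base + a) = tail))).map
        (fun a => (rem.dropLast, base + a)) := by
  rw [searchChildren_eq, PySem.List.pyRange_neg_one_eq_reverse]
  norm_num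
  rfl

-- first non-(-1) result of A's search along a list of (remaining_out, A) states
def firstHit : List (List Int × Int) → Int
  | [] => -1
  | (r, v) :: rest => if search r v ≠ -1 then search r v else firstHit rest

-- A's inner loop from counter a onwards = firstHit over the cond-satisfying digits a..7
theorem searchLoop_eq (k : Nat) : ∀ (a : Nat) (rem : List Int) (A8 tail : Int),
    8 - a ≤ k → rem.getLast? = some tail →
    searchLoop rem A8 a =
      firstHit (((PySem.List.pyRange (a : Int) 8 1).filter (fun x => decide (pvDigit (A8 + x) = tail))).map
        (fun x => (rem.dropLast, A8 + x))) := by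
  induction k with
  | zero =>
    intro a rem A8 tail hk _
    have ha : 8 ≤ a := by omega
    rw [searchLoop, dif_neg (by omega), PySem.List.pyRange_one_eq_nil (by exact_mod_cast ha)]
    rfl
  | succ k ih =>
    intro a rem A8 tail hk htail
    by_cases ha : a < 8
    · have hrange : PySem.List.pyRange (a : Int) 8 1 = (a : Int) :: PySem.List.pyRange ((a : Int) + 1) 8 1 :=
        PySem.List.pyRange_one_cons (by exact_mod_cast ha)
      have hcast : ((a : Int) + 1) = (((a + 1 : Nat)) : Int) := by push_cast; ring
      have hio : PySem.List.pyGet? rem (-1) = some tail := by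
        rw [PySem.List.pyGet?_neg_one]; exact htail
      have hC : PySem.Int.floordiv (A8 + (a : Int))
            ((2:Int) ^ (PySem.Int.bxor (PySem.Int.band (A8 + (a : Int)) 7) 1).toNat)
          = (A8 + (a : Int)) >>> (PySem.Int.bxor (PySem.Int.band (A8 + (a : Int)) 7) 1).toNat :=
        pv_floordiv_pow _ _
      rw [searchLoop, dif_pos ha]
      simp only [hio, hC, PySem.List.slice_to_neg_one]
      rw [hrange]
      by_cases hd : pvDigit (A8 + (a : Int)) = tail
      · rw [dif_pos (show some tail = some _ from by rw [← hd]; rfl)]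
        simp only [List.filter_cons, decide_eq_true_eq, if_pos hd, List.map_cons]
        rw [firstHit]
        by_cases hf : search rem.dropLast (A8 + (a : Int)) = -1
        · rw [if_neg (by omega), if_neg (by omega)]
          rw [ih (a + 1) rem A8 tail (by omega) htail, hcast]
        · rw [if_pos hf, if_pos hf]
      · rw [dif_neg (show ¬ (some tail = some _) from by
          intro hcontra
          exact hd (Option.some_inj.mp hcontra).symm)]
        simp only [List.filter_cons, decide_eq_true_eq, if_neg hd]
        rw [ih (a + 1) rem A8 tail (by omega) htail, hcast]
    · rw [searchLoop, dif_neg ha, PySem.List.pyRange_one_eq_nil (by exact_mod_cast (by omega : 8 ≤ a))]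
      rfl

-- the heart of the equivalence: popping (rem, A) explores exactly A's DFS of (rem, A),
-- the rest of the stack being reached iff that DFS fails (the hypothesis 'A = -1 → st = []'
-- holds on every reachable stack: a -1-valued state only arises on the a=7-everywhere path,
-- which is the last node of the whole DFS).
theorem goStack_cons : ∀ (n : Nat) (rem : List Int) (A : Int) (st : List (List Int × Int)),
    rem.length ≤ n → (A = -1 → st = []) →
    goStack ((rem, A) :: st) = if search rem A ≠ -1 then search rem A else goStack st := by
  intro n
  induction n with
  | zero =>
    intro rem A st hlen H
    have hrem : rem = [] := List.eq_nil_of_length_eq_zero (by omega)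
    subst hrem
    rw [goStack, dif_pos rfl, search, if_pos rfl]
    by_cases hA : A = -1
    · rw [H hA, if_neg (by omega), goStack]; omega
    · rw [if_pos hA]
  | succ n ih =>
    intro rem A st hlen H
    by_cases hrem : rem = []
    · subst hrem
      rw [goStack, dif_pos rfl, search, if_pos rfl]
      by_cases hA : A = -1
      · rw [H hA, if_neg (by omega), goStack]; omega
      · rw [if_pos hA]
    · have hlast : rem.getLast? = some (rem.getLast hrem) := List.getLast?_eq_some_getLast hrem
      have htailD : PySem.List.pyGetD rem (-1) 0 = rem.getLast hrem := PySem.List.pyGetD_neg_one rem 0 hrem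
      rw [goStack, dif_neg hrem, htailD, children_rev]
      -- inner induction over the (ascending) list of accepted digits
      have inner : ∀ (l : List Int), l.Pairwise (· < ·) → (∀ x ∈ l, 0 ≤ x ∧ x < 8) →
          goStack ((l.map (fun a => (rem.dropLast, A * 8 + a))) ++ st)
            = (if firstHit (l.map (fun a => (rem.dropLast, A * 8 + a))) ≠ -1
               then firstHit (l.map (fun a => (rem.dropLast, A * 8 + a)))
               else goStack st) := by
        intro l
        induction l with
        | nil => intro _ _; rw [List.map_nil, List.nil_append, firstHit, if_neg (by omega)]
        | cons x l' ihl =>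
          intro hpw hmem
          obtain ⟨hx0, hx8⟩ := hmem x List.mem_cons_self
          have H' : A * 8 + x = -1 → l'.map (fun a => (rem.dropLast, A * 8 + a)) ++ st = [] := by
            intro hne1
            have hA : A = -1 ∧ x = 7 := by omega
            have hl' : l' = [] := by
              rcases l' with _ | ⟨y, l''⟩
              · rfl
              · exfalso
                have hy8 := (hmem y (by simp)).2
                have hxy : x < y := (List.pairwise_cons.mp hpw).1 y (by simp)
                omega
            rw [hl', H hA.1]; rfl
          rw [List.map_cons, List.cons_append,
            ih rem.dropLast (A * 8 + x) _ (by
              rw [List.length_dropLast]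
              have hpos : 0 < rem.length := List.length_pos_iff.mpr hrem
              omega) H']
          rw [firstHit]
          by_cases hf : search rem.dropLast (A * 8 + x) = -1
          · have h1 : ¬(search rem.dropLast (A * 8 + x) ≠ -1) := by omega
            simp only [if_neg h1]
            exact ihl (List.pairwise_cons.mp hpw).2 (fun y hy => hmem y (List.mem_cons_of_mem _ hy))
          · simp only [if_pos hf]
      rw [inner _
        (List.Pairwise.sublist List.filter_sublist (PySem.List.pairwise_lt_pyRange_one 0 8))
        (fun x hx => by
          have hx' : x ∈ PySem.List.pyRange 0 8 1 := (List.mem_filter.mp hx).1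
          exact ⟨(PySem.List.mem_pyRange_one.mp hx').1, (PySem.List.mem_pyRange_one.mp hx').2⟩)]
      have hsearch : search rem A =
          firstHit ((((PySem.List.pyRange 0 8 1).filter (fun x => decide (pvDigit (A * 8 + x) = rem.getLast hrem)))).map
            (fun x => (rem.dropLast, A * 8 + x))) := by
        rw [search, if_neg hrem]
        exact searchLoop_eq 8 0 rem (A * 8) (rem.getLast hrem) (by omega) hlast
      rw [hsearch]

-- ===== VERDICT (by name: the statement is the Claim_ definition above) =====
theorem search_spec : Claim_equal_search := by
  intro out_ A _dom
  unfold Spec_search search_alt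
  rw [goStack_cons out_.length out_ A [] le_rfl (fun _ => rfl)]
  by_cases hf : search out_ A = -1
  · rw [if_neg (by omega), goStack, hf]
  · rw [if_pos hf]
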